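-- pv_equiv track=rewrite | github.com/luke6a52/AdventOfCode | 2025/helpers.py | getRays
-- ===== SOURCE A (Python) =====
-- def getRays(start, length=1):
--     (i, j) = start
--     rays = {'right': [], 'downright': [], 'down': [], 'downleft': [], 'left': [], 'upleft': [], 'up': [], 'upright': []}
--     for n in range(1, length+1):
--         rays['right'    ].append((i  ,j+n))
--         rays['downright'].append((i+n,j+n))
--         rays['down'     ].append((i+n,j  ))
--         rays['downleft' ].append((i+n,j-n))
--         rays['left'     ].append((i  ,j-n))
--         rays['upleft'   ].append((i-n,j-n))
--         rays['up'       ].append((i-n,j  ))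
--         rays['upright'  ].append((i-n,j+n))
--     return rays
-- ===== SOURCE B (Python) =====
-- def getRays(start, length=1):
--     (i, j) = start
--     # enumerate only the 4 rays in the right/down half-plane
--     right     = [(i,     j + n) for n in range(1, length + 1)]
--     downright = [(i + n, j + n) for n in range(1, length + 1)]
--     down      = [(i + n, j    ) for n in range(1, length + 1)]
--     downleft  = [(i + n, j - n) for n in range(1, length + 1)]
--
--     def mirror(ray):
--         # point-reflection of a ray through the start cell
--         return [(2 * i - x, 2 * j - y) for (x, y) in ray]
--
--     return {'right': right, 'downright': downright, 'down': down, 'downleft': downleft,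
--             'left': mirror(right), 'upleft': mirror(downright),
--             'up': mirror(down), 'upright': mirror(downleft)}
-- ===== Notes on version B (the rewrite author's own statement) =====
-- stated objective: alternative
-- what changed: B enumerates only the 4 rays of the right/down half-plane and derives the other 4 by point-reflecting each enumerated ray through the start cell, instead of A's step-major loop appending one cell to all 8 rays per step.
import Mathlib
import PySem

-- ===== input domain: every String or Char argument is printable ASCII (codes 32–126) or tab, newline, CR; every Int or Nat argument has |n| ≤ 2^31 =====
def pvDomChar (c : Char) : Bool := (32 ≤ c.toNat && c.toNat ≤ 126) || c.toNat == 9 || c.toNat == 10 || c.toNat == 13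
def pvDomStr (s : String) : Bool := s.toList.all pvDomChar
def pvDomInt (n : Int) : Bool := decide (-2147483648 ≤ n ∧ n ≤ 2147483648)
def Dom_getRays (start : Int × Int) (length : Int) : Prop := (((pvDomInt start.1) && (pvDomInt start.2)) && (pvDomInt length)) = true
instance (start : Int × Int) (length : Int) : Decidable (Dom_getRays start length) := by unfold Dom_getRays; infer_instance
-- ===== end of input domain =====

-- B enumerates only the 4 right/down rays and derives the other 4 by point-reflection
-- through the start cell, instead of A's step-major loop appending to all 8 rays (alternative; same cost).

-- ===== PORT A =====
-- step-major loop: for each n, append one cell to each of the 8 rays in the dict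
def getRays (start : Int × Int) (length : Int) : List (String × List (Int × Int)) :=
  let i := start.1
  let j := start.2
  let rays : PySem.Dict String (List (Int × Int)) :=
    PySem.Dict.ofList [("right", []), ("downright", []), ("down", []), ("downleft", []),
                       ("left", []), ("upleft", []), ("up", []), ("upright", [])]
  let rays := (PySem.List.pyRange 1 (length + 1) 1).foldl (fun d n =>
    let d := d.modify "right"     [] (· ++ [(i,     j + n)])
    let d := d.modify "downright" [] (· ++ [(i + n, j + n)])
    let d := d.modify "down"      [] (· ++ [(i + n, j)])
    let d := d.modify "downleft"  [] (· ++ [(i + n, j - n)])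
    let d := d.modify "left"      [] (· ++ [(i,     j - n)])
    let d := d.modify "upleft"    [] (· ++ [(i - n, j - n)])
    let d := d.modify "up"        [] (· ++ [(i - n, j)])
    let d := d.modify "upright"   [] (· ++ [(i - n, j + n)])
    d) rays
  rays.items

-- ===== PORT B =====
-- point-reflection of a ray through the start cell (i, j)
def pvMirror (i j : Int) (ray : List (Int × Int)) : List (Int × Int) :=
  ray.map (fun p => (2 * i - p.1, 2 * j - p.2))

-- enumerate the 4 right/down rays; the 4 opposite rays are their mirrors
def getRays_alt (start : Int × Int) (length : Int) : List (String × List (Int × Int)) :=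
  let i := start.1
  let j := start.2
  let ns := PySem.List.pyRange 1 (length + 1) 1
  let right     := ns.map (fun n => (i,     j + n))
  let downright := ns.map (fun n => (i + n, j + n))
  let down      := ns.map (fun n => (i + n, j))
  let downleft  := ns.map (fun n => (i + n, j - n))
  [("right", right), ("downright", downright), ("down", down), ("downleft", downleft),
   ("left", pvMirror i j right), ("upleft", pvMirror i j downright),
   ("up", pvMirror i j down), ("upright", pvMirror i j downleft)]

-- ===== PRECONDITION & SPEC =====
def Spec_getRays (start : Int × Int) (length : Int) (out : List (String × List (Int × Int))) : Prop := out = getRays_alt start length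
instance (start : Int × Int) (length : Int) (out : List (String × List (Int × Int))) : Decidable (Spec_getRays start length out) := by unfold Spec_getRays; infer_instance

-- ===== CLAIM =====
def Claim_equal_getRays : Prop := ∀ (start : Int × Int) (length : Int), Dom_getRays start length → Spec_getRays start length (getRays start length)

-- ===== LEMMAS AND PROOFS =====

-- invariant of A's loop: folding the step over any list ns appends to each ray
theorem getRays_loop_inv (i j : Int) (ns : List Int) :
    ∀ (a b c d e f g h : List (Int × Int)),
    ((ns.foldl (fun d n =>
        let d := d.modify "right"     [] (· ++ [(i,     j + n)])
        let d := d.modify "downright" [] (· ++ [(i + n, j + n)])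
        let d := d.modify "down"      [] (· ++ [(i + n, j)])
        let d := d.modify "downleft"  [] (· ++ [(i + n, j - n)])
        let d := d.modify "left"      [] (· ++ [(i,     j - n)])
        let d := d.modify "upleft"    [] (· ++ [(i - n, j - n)])
        let d := d.modify "up"        [] (· ++ [(i - n, j)])
        let d := d.modify "upright"   [] (· ++ [(i - n, j + n)])
        d)
      (PySem.Dict.mk [("right", a), ("downright", b), ("down", c), ("downleft", d),
                      ("left", e), ("upleft", f), ("up", g), ("upright", h)])).items)
    = [("right",     a ++ ns.map (fun n => (i,     j + n))),
       ("downright", b ++ ns.map (fun n => (i + n, j + n))),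
       ("down",      c ++ ns.map (fun n => (i + n, j))),
       ("downleft",  d ++ ns.map (fun n => (i + n, j - n))),
       ("left",      e ++ ns.map (fun n => (i,     j - n))),
       ("upleft",    f ++ ns.map (fun n => (i - n, j - n))),
       ("up",        g ++ ns.map (fun n => (i - n, j))),
       ("upright",   h ++ ns.map (fun n => (i - n, j + n)))] := by
  induction ns with
  | nil =>
      intro a b c d e f g h
      simp
  | cons n ns ih =>
      intro a b c d e f g h
      have hstep :
          ((PySem.Dict.mk [("right", a), ("downright", b), ("down", c), ("downleft", d),
                           ("left", e), ("upleft", f), ("up", g), ("upright", h)]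
            : PySem.Dict String (List (Int × Int))).modify "right" [] (· ++ [(i, j + n)])
            |>.modify "downright" [] (· ++ [(i + n, j + n)])
            |>.modify "down"      [] (· ++ [(i + n, j)])
            |>.modify "downleft"  [] (· ++ [(i + n, j - n)])
            |>.modify "left"      [] (· ++ [(i,     j - n)])
            |>.modify "upleft"    [] (· ++ [(i - n, j - n)])
            |>.modify "up"        [] (· ++ [(i - n, j)])
            |>.modify "upright"   [] (· ++ [(i - n, j + n)]))
          = PySem.Dict.mk [("right", a ++ [(i, j + n)]), ("downright", b ++ [(i + n, j + n)]),
                           ("down", c ++ [(i + n, j)]), ("downleft", d ++ [(i + n, j - n)]),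
                           ("left", e ++ [(i, j - n)]), ("upleft", f ++ [(i - n, j - n)]),
                           ("up", g ++ [(i - n, j)]), ("upright", h ++ [(i - n, j + n)])] := by
        simp [PySem.Dict.modify, PySem.Dict.insert, PySem.Dict.getD, PySem.Dict.get?,
              PySem.Dict.contains]
      simp only [List.foldl_cons, hstep, ih, List.map_cons, List.append_assoc,
        List.singleton_append]

-- ===== VERDICT =====
theorem getRays_spec : Claim_equal_getRays := by
  intro start length _
  show getRays start length = getRays_alt start length
  simp only [getRays, getRays_alt, pvMirror]
  have hofList : (PySem.Dict.ofList [("right", []), ("downright", []), ("down", []), ("downleft", []),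
                       ("left", []), ("upleft", []), ("up", []), ("upright", [])]
      : PySem.Dict String (List (Int × Int)))
      = PySem.Dict.mk [("right", []), ("downright", []), ("down", []), ("downleft", []),
                       ("left", []), ("upleft", []), ("up", []), ("upright", [])] := by decide
  rw [hofList, getRays_loop_inv]
  simp only [List.map_map, List.nil_append, Function.comp_def]
  ring_nf
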